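-- pv_equiv track=rewrite | github.com/Lienep0/Advent-Of-Code | 2023/Day-12/part1.py | is_full_solution
-- ===== SOURCE A (Python) =====
-- def is_full_solution(springs, record):
--     i = 0
--     group_index = 0
--     on_group = False
--     while i < len(springs):
--         if springs[i] == "#" and not on_group:
--             start = i
--             on_group = True
--             if group_index >= len(record):
--                 return False
--         elif not springs[i] == "#" and on_group:
--             on_group = False
--             group_size = i - start
--             if record[group_index] != group_size:
--                 return False
--             group_index += 1
--         i += 1
--
--     # Check end group
--     if on_group:
--         group_size = i - start
--         if record[group_index] != group_size:
--             return False
--         group_index += 1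
--
--     return group_index == len(record)
-- ===== SOURCE B (Python) =====
-- def is_full_solution(springs, record):
--     runs = []
--     s = springs
--     while "#" in s:
--         s = s[s.index("#"):]
--         m = len(s)
--         s = s.lstrip("#")
--         runs.append(m - len(s))
--     return runs == list(record)
-- ===== Notes on version B (the rewrite author's own statement) =====
-- stated objective: faster
-- what changed: A's single interleaved per-character scan with index/on_group/start state and early returns is replaced by materialising the list of '#'-run lengths (jumping with s.index('#') and s.lstrip('#')) and doing one list equality comparison against the record.
import Mathlib
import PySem

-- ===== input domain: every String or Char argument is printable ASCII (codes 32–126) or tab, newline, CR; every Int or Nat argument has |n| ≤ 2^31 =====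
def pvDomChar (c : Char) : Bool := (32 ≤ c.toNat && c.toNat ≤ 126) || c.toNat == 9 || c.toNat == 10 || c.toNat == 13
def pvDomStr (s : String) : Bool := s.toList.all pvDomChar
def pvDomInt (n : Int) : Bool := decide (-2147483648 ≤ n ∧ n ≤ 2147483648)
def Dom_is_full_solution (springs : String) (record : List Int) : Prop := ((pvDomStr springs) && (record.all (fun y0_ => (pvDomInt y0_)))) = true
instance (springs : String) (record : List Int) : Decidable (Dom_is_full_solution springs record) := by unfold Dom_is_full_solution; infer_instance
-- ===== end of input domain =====

-- B replaces A's interleaved boundary-tracking scan (index/flag/early returns) by materialising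
-- the list of '#'-run lengths with string jumps (index/lstrip) and one list comparison
-- (measured constant-factor faster in Python; same O(n)).

-- ===== PORT A =====
-- A's while loop over i with state (i, group_index, on_group, start), transliterated as a
-- recursion over the remaining characters. record[group_index] is read via pyGetD: on every
-- reachable read A has already checked group_index < len(record) at the start of the group,
-- so Python never raises and the default is never returned — the port is exact on all inputs.
def pvLoopA (record : List Int) : List Char → Int → Int → Bool → Int → Bool
  | [], i, gi, on, start =>
      if on then
        if PySem.List.pyGetD record gi 0 ≠ i - start then false
        else decide (gi + 1 = (record.length : Int))
      else decide (gi = (record.length : Int))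
  | c :: rest, i, gi, on, start =>
      if c = '#' ∧ on = false then
        if gi ≥ (record.length : Int) then false
        else pvLoopA record rest (i + 1) gi true i
      else if ¬ c = '#' ∧ on = true then
        if PySem.List.pyGetD record gi 0 ≠ i - start then false
        else pvLoopA record rest (i + 1) (gi + 1) false start
      else pvLoopA record rest (i + 1) gi on start

def is_full_solution (springs : String) (record : List Int) : Bool :=
  pvLoopA record springs.toList 0 0 false 0

-- ===== PORT B =====
-- B's while loop: while "#" in s: jump to the first '#' (s = s[s.index("#"):], guarded by the
-- `in` test so PySem.Chars.find is nonnegative there), strip the run, append its length.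
-- s.lstrip("#") has no PySem primitive and is ported by hand as dropWhile (· = '#'), which is
-- exactly Python's lstrip with the single-character set "#"; m and s are inlined intermediates.
def pvLoopB (s : List Char) (runs : List Int) : List Int :=
  if PySem.Chars.isIn ['#'] s then
    pvLoopB ((s.drop (PySem.Chars.find s ['#']).toNat).dropWhile (· = '#'))
      (runs ++ [((s.drop (PySem.Chars.find s ['#']).toNat).length : Int)
                - (((s.drop (PySem.Chars.find s ['#']).toNat).dropWhile (· = '#')).length : Int)])
  else runs
termination_by s.length
decreasing_by
  have hin := PySem.Chars.isIn_iff_infix (sub := ['#']) (s := s) |>.mp (by assumption)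
  have hnn : 0 ≤ PySem.Chars.find s ['#'] := (PySem.Chars.find_nonneg_iff _ _).mpr hin
  obtain ⟨t, ht⟩ := (PySem.Chars.find_spec (s := s) (sub := ['#']) hnn).1
  have hdrop : s.drop (PySem.Chars.find s ['#']).toNat = '#' :: t := by simpa using ht.symm
  have h1 : ((s.drop (PySem.Chars.find s ['#']).toNat).dropWhile (· = '#')).length ≤ t.length := by
    rw [hdrop, List.dropWhile_cons]
    simpa using List.length_dropWhile_le (· = '#') t
  have h2 := congrArg List.length hdrop
  simp at h2
  omega

def is_full_solution_alt (springs : String) (record : List Int) : Bool :=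
  decide (pvLoopB springs.toList [] = record)

-- ===== PRECONDITION & SPEC =====
def Spec_is_full_solution (springs : String) (record : List Int) (out : Bool) : Prop := out = is_full_solution_alt springs record
instance (springs : String) (record : List Int) (out : Bool) : Decidable (Spec_is_full_solution springs record out) := by unfold Spec_is_full_solution; infer_instance

-- ===== CLAIM (what is proved, stated in full; the proofs are below) =====
def Claim_equal_is_full_solution : Prop := ∀ (springs : String) (record : List Int), Dom_is_full_solution springs record → Spec_is_full_solution springs record (is_full_solution springs record)

-- ===== LEMMAS AND PROOFS =====

-- The list of consecutive-'#' run lengths of a character list (the mathematical mediator).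
def pvRuns : List Char → List Int
  | [] => []
  | c :: cs =>
      if c = '#' then (((cs.takeWhile (· = '#')).length : Int) + 1) :: pvRuns (cs.dropWhile (· = '#'))
      else pvRuns cs
termination_by s => s.length
decreasing_by
  · have := List.length_dropWhile_le (· = '#') cs; simp; omega
  · simp

theorem pvRuns_no_hash {s : List Char} (h : '#' ∉ s) : pvRuns s = [] := by
  induction s with
  | nil => rw [pvRuns]
  | cons c cs ih =>
      rw [pvRuns]
      have hc : ¬ c = '#' := by intro hc; exact h (by simp [hc])
      rw [if_neg hc]
      exact ih (fun hm => h (by simp [hm]))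

theorem pvRuns_append_no_hash {t s : List Char} (h : '#' ∉ t) : pvRuns (t ++ s) = pvRuns s := by
  induction t with
  | nil => simp
  | cons c cs ih =>
      have hc : ¬ c = '#' := by intro hc; exact h (by simp [hc])
      rw [List.cons_append, pvRuns, if_neg hc]
      exact ih (fun hm => h (by simp [hm]))

theorem pvLoopB_eq (s : List Char) (runs : List Int) : pvLoopB s runs = runs ++ pvRuns s := by
  rw [pvLoopB]
  by_cases hin : PySem.Chars.isIn ['#'] s = true
  · rw [if_pos hin]
    have hinf := (PySem.Chars.isIn_iff_infix (sub := ['#']) (s := s)).mp hin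
    have hnn : 0 ≤ PySem.Chars.find s ['#'] := (PySem.Chars.find_nonneg_iff _ _).mpr hinf
    have hspec := PySem.Chars.find_spec (s := s) (sub := ['#']) hnn
    set i := (PySem.Chars.find s ['#']).toNat with hi
    obtain ⟨t, ht⟩ := hspec.1
    have hdrop : s.drop i = '#' :: t := by simpa using ht.symm
    have hlens : (s.drop i).length = t.length + 1 := by rw [hdrop]; simp
    have hlen : i < s.length := by simp at hlens; omega
    have htake : '#' ∉ s.take i := by
      intro hmem
      obtain ⟨j, hj, hjel⟩ := List.mem_iff_getElem.mp hmem
      have hji : j < i := by simp at hj; omega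
      have hjs : j < s.length := by simp at hj; omega
      have hsj : s[j] = '#' := by simpa using hjel
      refine hspec.2 j hji ⟨s.drop (j + 1), ?_⟩
      rw [List.singleton_append, ← hsj, ← List.drop_eq_getElem_cons hjs]
    have hdw : (s.drop i).dropWhile (· = '#') = t.dropWhile (· = '#') := by
      rw [hdrop, List.dropWhile_cons]; simp
    rw [pvLoopB_eq]
    rw [hdw]
    have hsplit : pvRuns s = pvRuns (s.drop i) := by
      conv_lhs => rw [← List.take_append_drop i s]
      exact pvRuns_append_no_hash htake
    have hruns : pvRuns (s.drop i) =
        (((t.takeWhile (· = '#')).length : Int) + 1) :: pvRuns (t.dropWhile (· = '#')) := by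
      rw [hdrop, pvRuns, if_pos rfl]
    have htw : (t.takeWhile (· = '#')).length + (t.dropWhile (· = '#')).length = t.length := by
      conv_rhs => rw [← List.takeWhile_append_dropWhile (p := (· = '#')) (l := t)]
      rw [List.length_append]
    have hcount : ((s.drop i).length : Int) - ((t.dropWhile (· = '#')).length : Int)
        = ((t.takeWhile (· = '#')).length : Int) + 1 := by
      rw [hlens]
      push_cast
      omega
    rw [hsplit, hruns, hcount]
    simp
  · rw [if_neg hin]
    have hno : '#' ∉ s := by
      intro hm
      apply hin
      rw [PySem.Chars.isIn_iff_infix]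
      obtain ⟨u, v, huv⟩ := List.append_of_mem hm
      exact ⟨u, v, by simp [huv]⟩
    rw [pvRuns_no_hash hno]
    simp
termination_by s.length
decreasing_by
  rw [← hi, hdw]
  have h1 := List.length_dropWhile_le (· = '#') t
  have h2 : s.length - i = t.length + 1 := by simpa using hlens
  omega

-- The main invariant of A's loop, simultaneously for both values of on_group.
theorem pvLoopA_inv (record : List Int) (cs : List Char) :
    ∀ (i start : Int) (g : Nat),
      (g ≤ record.length →
        pvLoopA record cs i (g : Int) false start = decide (pvRuns cs = record.drop g)) ∧
      (g < record.length →
        pvLoopA record cs i (g : Int) true start =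
          decide (((i - start + ((cs.takeWhile (· = '#')).length : Int)) :: pvRuns (cs.dropWhile (· = '#'))) = record.drop g)) := by
  induction cs with
  | nil =>
      intro i start g
      constructor
      · intro hg
        rw [pvLoopA, if_neg (by simp : ¬ (false = true)), pvRuns, decide_eq_decide]
        constructor
        · intro h
          have hge : g = record.length := by exact_mod_cast h
          rw [hge, List.drop_length]
        · intro h
          have := List.drop_eq_nil_iff.mp h.symm
          omega
      · intro hg
        rw [pvLoopA, if_pos rfl]
        have hget : PySem.List.pyGetD record ((g : Int)) 0 = record[g] := by
          rw [PySem.List.pyGetD_natCast]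
          exact List.getD_eq_getElem record 0 hg
        have hdropg : record.drop g = record[g] :: record.drop (g + 1) := List.drop_eq_getElem_cons hg
        rw [hget, hdropg]
        simp only [List.takeWhile_nil, List.dropWhile_nil, List.length_nil, Nat.cast_zero, add_zero]
        rw [pvRuns]
        by_cases heq : record[g] = i - start
        · rw [if_neg (by simp [heq]), decide_eq_decide]
          constructor
          · intro h
            have hlen' : g + 1 = record.length := by exact_mod_cast h
            rw [heq, hlen', List.drop_length]
          · intro h
            have := List.drop_eq_nil_iff.mp (List.cons_eq_cons.mp h).2.symm
            omega
        · rw [if_pos heq]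
          symm
          simp only [decide_eq_false_iff_not, List.cons.injEq, not_and]
          intro h
          exact fun _ => heq h.symm
  | cons c rest ih =>
      intro i start g
      constructor
      · -- off state
        intro hg
        rw [pvLoopA]
        by_cases hc : c = '#'
        · rw [if_pos ⟨hc, rfl⟩]
          by_cases hge : (g : Int) ≥ (record.length : Int)
          · rw [if_pos hge]
            have hgeq : g = record.length := by omega
            rw [hgeq, List.drop_length, pvRuns, if_pos hc]
            simp
          · rw [if_neg hge]
            have hglt : g < record.length := by omega
            rw [(ih (i + 1) i g).2 hglt, pvRuns, if_pos hc]
            have : ((i + 1) - i + ((rest.takeWhile (· = '#')).length : Int))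
                = ((rest.takeWhile (· = '#')).length : Int) + 1 := by ring
            rw [this]
        · rw [if_neg (by simp [hc]), if_neg (by simp), (ih (i + 1) start g).1 hg,
            pvRuns, if_neg hc]
      · -- on state
        intro hg
        rw [pvLoopA]
        by_cases hc : c = '#'
        · rw [if_neg (by simp), if_neg (by simp [hc]), (ih (i + 1) start g).2 hg]
          rw [List.takeWhile_cons, List.dropWhile_cons]
          simp only [hc, decide_true, if_true, List.length_cons]
          have : (i - start + (((rest.takeWhile (· = '#')).length + 1 : Nat) : Int))
              = (i + 1 - start + ((rest.takeWhile (· = '#')).length : Int)) := by push_cast; ring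
          rw [this]
        · rw [if_neg (by simp [hc]), if_pos ⟨hc, rfl⟩]
          have hget : PySem.List.pyGetD record ((g : Int)) 0 = record[g] := by
            rw [PySem.List.pyGetD_natCast]
            exact List.getD_eq_getElem record 0 hg
          have hdropg : record.drop g = record[g] :: record.drop (g + 1) := List.drop_eq_getElem_cons hg
          rw [hget, hdropg, List.takeWhile_cons, List.dropWhile_cons]
          simp only [hc, decide_false, Bool.false_eq_true, if_false, List.length_nil,
            Nat.cast_zero, add_zero]
          by_cases heq : record[g] = i - start
          · rw [if_neg (by simp [heq])]
            have hcast : ((g : Int) + 1) = (((g + 1 : Nat)) : Int) := by push_cast; ring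
            rw [hcast, (ih (i + 1) start (g + 1)).1 (by omega)]
            rw [decide_eq_decide]
            rw [show pvRuns (c :: rest) = pvRuns rest from by rw [pvRuns, if_neg hc]]
            constructor
            · intro h
              rw [h, heq]
            · intro h
              exact (List.cons_eq_cons.mp h).2
          · rw [if_pos heq]
            symm
            simp only [decide_eq_false_iff_not, List.cons.injEq, not_and]
            intro h
            exact fun _ => heq h.symm

-- ===== VERDICT (by name: the statement is the Claim_ definition above) =====
theorem is_full_solution_spec : Claim_equal_is_full_solution := by
  intro springs record _
  unfold Spec_is_full_solution is_full_solution is_full_solution_alt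
  rw [pvLoopB_eq]
  have h := (pvLoopA_inv record springs.toList 0 0 0).1 (Nat.zero_le _)
  simpa using h
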